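-- pv_equiv track=rewrite | github.com/thaiantunes/aoc2023 | day1/second_solution.py | last_number
-- ===== SOURCE A (Python) =====
-- numbers = {"one":"1", "two":"2", "three":"3", "four":"4", "five":"5", "six":"6", "seven":"7", "eight":"8", "nine":"9", "zero":"0", "0":"0", "1":"1", "2":"2", "3":"3", "4":"4", "5":"5", "6":"6", "7":"7", "8":"8", "9":"9", "0":"0"}
--
-- def last_number(word):
--     index_max = -1
--     number_max = None
--     for i in numbers.keys():
--         if i in word:
--             index = word.rfind(i)
--             if index != -1 and index > index_max:
--                 index_max = index
--                 number_max = i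
--     return number_max
-- ===== SOURCE B (Python) =====
-- def last_number(word):
--     # Right-to-left scan over start positions: at each position return a digit
--     # character directly, otherwise the spelled-out number word starting there.
--     spelled = ("one", "two", "three", "four", "five", "six", "seven", "eight", "nine", "zero")
--     for i in range(len(word) - 1, -1, -1):
--         c = word[i]
--         if c.isdigit():
--             return c
--         for w in spelled:
--             if word[i:i + len(w)] == w:
--                 return w
--     return None
-- ===== Notes on version B (the rewrite author's own statement) =====
-- stated objective: alternative
-- what changed: B scans character positions right-to-left and at each position returns the digit character itself or the spelled-out word starting there, stopping at the first hit; A makes a pass over all 20 dictionary keys computing rfind for each and keeping the one with the maximal index.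
import Mathlib
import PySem

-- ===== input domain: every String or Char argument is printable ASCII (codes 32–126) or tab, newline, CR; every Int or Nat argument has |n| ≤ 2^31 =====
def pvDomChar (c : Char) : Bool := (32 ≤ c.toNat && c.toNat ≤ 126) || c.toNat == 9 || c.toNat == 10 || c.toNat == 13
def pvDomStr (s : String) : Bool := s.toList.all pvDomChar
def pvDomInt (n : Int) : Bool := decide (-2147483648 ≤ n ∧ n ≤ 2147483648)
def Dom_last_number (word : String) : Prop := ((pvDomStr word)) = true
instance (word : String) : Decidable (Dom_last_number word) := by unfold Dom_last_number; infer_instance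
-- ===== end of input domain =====

-- B scans character positions right-to-left, returning the digit char itself or the spelled-out
-- word starting there (first hit = rightmost match), instead of A's pass over the key dictionary
-- computing rfind per key and keeping the max index (alternative).

-- ===== PORT A =====
-- module constant of A: the `numbers` dict (duplicate "0" literal kept, as in the source)
def numbers : PySem.Dict String String := PySem.Dict.ofList [("one","1"), ("two","2"), ("three","3"), ("four","4"), ("five","5"), ("six","6"), ("seven","7"), ("eight","8"), ("nine","9"), ("zero","0"), ("0","0"), ("1","1"), ("2","2"), ("3","3"), ("4","4"), ("5","5"), ("6","6"), ("7","7"), ("8","8"), ("9","9"), ("0","0")]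

def last_number (word : String) : Option String :=
  (numbers.keys.foldl
    (fun (st : Int × Option String) i =>
      if PySem.Str.isIn i word then
        let index := PySem.Str.rfind word i
        if index ≠ -1 ∧ st.1 < index then (index, some i) else st
      else st)
    (-1, none)).2

-- ===== PORT B =====
-- B's tuple of spelled-out number words
def lnWords : List String := ["one", "two", "three", "four", "five", "six", "seven", "eight", "nine", "zero"]

-- the body of B's outer loop at position i: digit char, else matching spelled word
def lnMatchAt (word : String) (i : Nat) : Option String :=
  match PySem.Str.pyGet? word (i : Int) with
  | none => none
  | some c =>
    if PySem.Chars.isdigit c then some (String.ofList [c])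
    else lnWords.find? (fun w =>
      PySem.Str.slice word (some (i : Int)) (some ((i : Int) + PySem.Str.len w)) == w)

-- `for i in range(len(word)-1, -1, -1)` with early return: argument m scans m-1, m-2, …, 0
def lnScan (word : String) : Nat → Option String
  | 0 => none
  | i + 1 =>
    match lnMatchAt word i with
    | some k => some k
    | none => lnScan word i

def last_number_alt (word : String) : Option String :=
  lnScan word word.toList.length

-- ===== PRECONDITION & SPEC =====
def Spec_last_number (word : String) (out : Option String) : Prop := out = last_number_alt word
instance (word : String) (out : Option String) : Decidable (Spec_last_number word out) := by unfold Spec_last_number; infer_instance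

-- ===== CLAIM (what is proved, stated in full; the proofs are below) =====
def Claim_equal_last_number : Prop := ∀ (word : String), Dom_last_number word → Spec_last_number word (last_number word)

-- ===== LEMMAS AND PROOFS =====

-- rfind cs sub is the HIGHEST index where sub is a prefix of the drop, or -1
theorem pv_go_spec (s sub : List Char) (j : Nat) :
    (PySem.Chars.rfind.go s sub j = -1 ∧ ∀ i ≤ j, ¬ sub <+: s.drop i) ∨
    (∃ i ≤ j, PySem.Chars.rfind.go s sub j = (i : Int) ∧ sub <+: s.drop i ∧
      ∀ i' ≤ j, sub <+: s.drop i' → i' ≤ i) := by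
  induction j with
  | zero =>
    by_cases h : sub.isPrefixOf s
    · right
      refine ⟨0, le_refl _, ?_, ?_, ?_⟩
      · simp [PySem.Chars.rfind.go, h]
      · simpa [List.isPrefixOf_iff_prefix] using h
      · omega
    · left
      constructor
      · simp [PySem.Chars.rfind.go, h]
      · intro i hi
        interval_cases i
        simpa [List.isPrefixOf_iff_prefix] using h
  | succ j ih =>
    by_cases h : sub.isPrefixOf (s.drop (j+1))
    · right
      refine ⟨j+1, le_refl _, ?_, ?_, fun i' hi' _ => hi'⟩
      · simp [PySem.Chars.rfind.go, h]
      · simpa [List.isPrefixOf_iff_prefix] using h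
    · have hgo : PySem.Chars.rfind.go s sub (j+1) = PySem.Chars.rfind.go s sub j := by
        simp [PySem.Chars.rfind.go, h]
      have hnot : ¬ sub <+: s.drop (j+1) := by
        simpa [List.isPrefixOf_iff_prefix] using h
      rcases ih with ⟨h1, h2⟩ | ⟨i, hij, hgoi, hpre, hmax⟩
      · left
        refine ⟨by rw [hgo]; exact h1, fun i hi hp => ?_⟩
        rcases Nat.lt_or_ge i (j+1) with hlt | hge
        · exact h2 i (by omega) hp
        · have : i = j+1 := by omega
          exact hnot (this ▸ hp)
      · right
        refine ⟨i, by omega, by rw [hgo]; exact hgoi, hpre, fun i' hi' hp => ?_⟩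
        rcases Nat.lt_or_ge i' (j+1) with hlt | hge
        · exact hmax i' (by omega) hp
        · have : i' = j+1 := by omega
          exact absurd (this ▸ hp) hnot

theorem pv_rfind_spec (s sub : List Char) (hsub : sub ≠ []) :
    (PySem.Chars.rfind s sub = -1 ∧ ∀ i, ¬ sub <+: s.drop i) ∨
    (∃ i ≤ s.length, PySem.Chars.rfind s sub = (i : Int) ∧ sub <+: s.drop i ∧
      ∀ i', sub <+: s.drop i' → i' ≤ i) := by
  have hout : ∀ i, s.length < i → ¬ sub <+: s.drop i := by
    intro i hi hp
    have hd : s.drop i = [] := List.drop_eq_nil_of_le (by omega)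
    rw [hd, List.prefix_nil] at hp
    exact hsub hp
  rcases pv_go_spec s sub s.length with ⟨h1, h2⟩ | ⟨i, hij, hgoi, hpre, hmax⟩
  · left
    refine ⟨h1, fun i hp => ?_⟩
    rcases Nat.lt_or_ge s.length i with hlt | hge
    · exact hout i hlt hp
    · exact h2 i hge hp
  · right
    refine ⟨i, hij, hgoi, hpre, fun i' hp => ?_⟩
    rcases Nat.lt_or_ge s.length i' with hlt | hge
    · exact absurd hp (hout i' hlt)
    · exact hmax i' hge hp

theorem pv_isIn_iff_rfind_nonneg (s sub : List Char) (hsub : sub ≠ []) :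
    PySem.Chars.isIn sub s = true ↔ 0 ≤ PySem.Chars.rfind s sub := by
  rw [← PySem.Chars.exists_prefix_drop_iff_isIn]
  rcases pv_rfind_spec s sub hsub with ⟨h1, h2⟩ | ⟨i, _, hgoi, hpre, _⟩
  · rw [h1]
    constructor
    · rintro ⟨j, hj⟩; exact absurd hj (h2 j)
    · intro h; omega
  · rw [hgoi]
    constructor
    · intro _; positivity
    · intro _; exact ⟨i, hpre⟩

-- the rfind value of key k in word (A's `index`)
def pvV (cs : List Char) (k : String) : Int := PySem.Chars.rfind cs k.toList

-- A's loop body, and its simplified form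
def pvF (word : String) (st : Int × Option String) (i : String) : Int × Option String :=
  if PySem.Str.isIn i word then
    let index := PySem.Str.rfind word i
    if index ≠ -1 ∧ st.1 < index then (index, some i) else st
  else st

def pvG (cs : List Char) (st : Int × Option String) (k : String) : Int × Option String :=
  if st.1 < pvV cs k then (pvV cs k, some k) else st

theorem pv_step_eq (word : String) (st : Int × Option String) (k : String)
    (hst : -1 ≤ st.1) (hk : k.toList ≠ []) :
    pvF word st k = pvG word.toList st k := by
  have hV : pvV word.toList k = -1 ∨ 0 ≤ pvV word.toList k := by
    rcases pv_rfind_spec word.toList k.toList hk with ⟨h1, _⟩ | ⟨i, _, hgoi, _, _⟩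
    · left; exact h1
    · right; rw [pvV, hgoi]; positivity
  have hisIn : PySem.Str.isIn k word = PySem.Chars.isIn k.toList word.toList := by
    simp [PySem.Str.isIn_eq]
  have hrf : PySem.Str.rfind word k = pvV word.toList k := by
    simp [pvV, PySem.Str.rfind_eq]
  unfold pvF pvG
  by_cases hin : PySem.Chars.isIn k.toList word.toList = true
  · have h0 : 0 ≤ pvV word.toList k := (pv_isIn_iff_rfind_nonneg _ _ hk).1 hin
    simp only [hisIn, hin, if_true, hrf]
    by_cases hlt : st.1 < pvV word.toList k
    · rw [if_pos ⟨by omega, hlt⟩, if_pos hlt]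
    · rw [if_neg (by omega), if_neg hlt]
  · have h1 : ¬ (0 ≤ pvV word.toList k) := fun h => hin ((pv_isIn_iff_rfind_nonneg _ _ hk).2 h)
    have : pvV word.toList k = -1 := by rcases hV with h | h; exact h; omega
    simp only [hisIn, hin, if_false, Bool.false_eq_true]
    rw [if_neg (by omega)]

theorem pv_foldl_f_eq_g (word : String) (L : List String) (st : Int × Option String)
    (hkeys : ∀ k ∈ L, k.toList ≠ []) (hst : -1 ≤ st.1) :
    L.foldl (pvF word) st = L.foldl (pvG word.toList) st := by
  induction L generalizing st with
  | nil => rfl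
  | cons k L ih =>
    simp only [List.foldl_cons]
    rw [pv_step_eq word st k hst (hkeys k (by simp))]
    refine ih _ (fun k' hk' => hkeys k' (by simp [hk'])) ?_
    unfold pvG
    split_ifs with h
    · simp; omega
    · exact hst

theorem pv_fold_stay (cs : List Char) (L : List String) (st : Int × Option String)
    (h : ∀ k ∈ L, pvV cs k ≤ st.1) : L.foldl (pvG cs) st = st := by
  induction L with
  | nil => rfl
  | cons k L ih =>
    simp only [List.foldl_cons]
    rw [pvG, if_neg (by have := h k (by simp); omega)]
    exact ih (fun k' hk' => h k' (by simp [hk']))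

theorem pv_fold_pick (cs : List Char) (L : List String) (st : Int × Option String)
    (k : String) (hkL : k ∈ L) (hst : st.1 < pvV cs k)
    (hmax : ∀ k' ∈ L, k' ≠ k → pvV cs k' < pvV cs k) :
    L.foldl (pvG cs) st = (pvV cs k, some k) := by
  induction L generalizing st with
  | nil => cases hkL
  | cons a L ih =>
    simp only [List.foldl_cons]
    by_cases hak : a = k
    · subst hak
      rw [pvG, if_pos hst]
      exact pv_fold_stay cs L _ (fun k' hk' => by
        by_cases h' : k' = a
        · subst h'; simp
        · have := hmax k' (by simp [hk']) h'; simp; omega)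
    · have hkL' : k ∈ L := by
        rcases List.mem_cons.1 hkL with h | h
        · exact absurd h.symm hak
        · exact h
      have hstep : (pvG cs st a).1 < pvV cs k := by
        unfold pvG
        split_ifs with h
        · simpa using hmax a (by simp) hak
        · exact hst
      exact ih _ hkL' hstep (fun k' hk' h' => hmax k' (by simp [hk']) h')

-- B's slice test is the prefix test
theorem pv_slice_toList (word k : String) (i : Nat) :
    (PySem.Str.slice word (some (i : Int)) (some ((i : Int) + PySem.Str.len k))).toList
      = (word.toList.drop i).take k.toList.length := by
  have h := PySem.List.slice_toNat (xs := word.toList) (a := (i : Int))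
      (b := (i : Int) + PySem.Str.len k) (by positivity)
      (by simp [PySem.Str.len_eq]; positivity)
  have h2 : (PySem.Str.slice word (some (i : Int)) (some ((i : Int) + PySem.Str.len k))).toList
      = PySem.List.slice word.toList (some (i : Int)) (some ((i : Int) + PySem.Str.len k)) := by
    simp [PySem.Str.slice, PySem.Chars.slice_eq_listSlice]
  rw [h2, h]
  have hlen : PySem.Str.len k = (k.toList.length : Int) := by simp [PySem.Str.len_eq]
  rw [hlen]
  congr 1
  omega

theorem pv_slice_test (word k : String) (i : Nat) :
    (PySem.Str.slice word (some (i : Int)) (some ((i : Int) + PySem.Str.len k)) == k) = true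
      ↔ k.toList <+: word.toList.drop i := by
  rw [beq_iff_eq, ← String.toList_inj, pv_slice_toList, List.prefix_iff_eq_take]
  exact ⟨fun h => h.symm, fun h => h.symm⟩

-- concrete key-list facts
theorem pv_keys_eq : numbers.keys = ["one", "two", "three", "four", "five", "six", "seven",
    "eight", "nine", "zero", "0", "1", "2", "3", "4", "5", "6", "7", "8", "9"] := by decide

theorem pv_keys_split : numbers.keys = lnWords ++ ["0", "1", "2", "3", "4", "5", "6", "7", "8", "9"] := by decide

theorem pv_keys_ne_nil : ∀ k ∈ numbers.keys, k.toList ≠ [] := by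
  rw [pv_keys_eq]; decide

theorem pv_keys_prefix_free :
    ∀ k ∈ numbers.keys, ∀ k' ∈ numbers.keys, k.toList <+: k'.toList → k = k' := by
  rw [pv_keys_eq]; decide

-- two keys matching at the same position are equal
theorem pv_uniq (t : List Char) (k k' : String)
    (hk : k ∈ numbers.keys) (hk' : k' ∈ numbers.keys)
    (h1 : k.toList <+: t) (h2 : k'.toList <+: t) : k = k' := by
  rcases List.prefix_or_prefix_of_prefix h1 h2 with h | h
  · exact pv_keys_prefix_free k hk k' hk' h
  · exact (pv_keys_prefix_free k' hk' k hk h).symm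

-- find? returns the unique satisfier
theorem pv_find?_eq_some (L : List String) (p : String → Bool) (k : String)
    (hk : k ∈ L) (hp : p k = true) (huniq : ∀ k' ∈ L, p k' = true → k' = k) :
    L.find? p = some k := by
  induction L with
  | nil => cases hk
  | cons a L ih =>
    by_cases hpa : p a = true
    · rw [List.find?_cons_of_pos hpa, huniq a (by simp) hpa]
    · rw [List.find?_cons_of_neg hpa]
      have hkL : k ∈ L := by
        rcases List.mem_cons.1 hk with h | h
        · exact absurd (h ▸ hp) hpa
        · exact h
      exact ih hkL (fun k' hk' h' => huniq k' (by simp [hk']) h')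

-- the search over A's full key list at position i (proof-side bridge)
def pvFindK (word : String) (i : Nat) : Option String :=
  numbers.keys.find? (fun k =>
    PySem.Str.slice word (some (i : Int)) (some ((i : Int) + PySem.Str.len k)) == k)

theorem pv_findK_eq_some (word : String) (i : Nat) (k : String)
    (hk : k ∈ numbers.keys) (hpre : k.toList <+: word.toList.drop i) :
    pvFindK word i = some k := by
  refine pv_find?_eq_some _ _ k hk ((pv_slice_test word k i).2 hpre) ?_
  intro k' hk' hp'
  exact pv_uniq (word.toList.drop i) k' k hk' hk ((pv_slice_test word k' i).1 hp') hpre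

-- an ASCII digit char is one of '0'..'9'
theorem pv_digit_enum (c : Char) (h : PySem.Chars.isdigit c = true) :
    c = '0' ∨ c = '1' ∨ c = '2' ∨ c = '3' ∨ c = '4' ∨ c = '5' ∨ c = '6' ∨ c = '7' ∨ c = '8' ∨ c = '9' := by
  simp only [PySem.Chars.isdigit, Bool.and_eq_true, decide_eq_true_eq] at h
  obtain ⟨h1, h2⟩ := h
  have hl : 48 ≤ c.toNat := h1
  have hr : c.toNat ≤ 57 := h2
  have hofn := Char.ofNat_toNat c
  interval_cases hc : c.toNat <;> (subst hofn; decide)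

-- BRIDGE: B's per-position body equals the search over A's full key list
theorem pv_at_eq_findK (word : String) (i : Nat) (hi : i < word.toList.length) :
    lnMatchAt word i = pvFindK word i := by
  set cs := word.toList with hcs
  have hget : PySem.Str.pyGet? word (i : Int) = some cs[i] := by
    rw [PySem.Str.pyGet?_natCast]
    exact List.getElem?_eq_getElem hi
  have hdrop : cs.drop i = cs[i] :: cs.drop (i + 1) := List.drop_eq_getElem_cons hi
  rw [lnMatchAt, hget]
  dsimp only
  by_cases hdig : PySem.Chars.isdigit cs[i] = true
  · rw [if_pos hdig]
    have hpre : (String.ofList [cs[i]]).toList <+: cs.drop i := by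
      rw [show (String.ofList [cs[i]]).toList = [cs[i]] by simp, hdrop]
      exact ⟨cs.drop (i + 1), rfl⟩
    have hmem : String.ofList [cs[i]] ∈ numbers.keys := by
      rcases pv_digit_enum cs[i] hdig with h|h|h|h|h|h|h|h|h|h <;> rw [h] <;> decide
    exact (pv_findK_eq_some word i _ hmem hpre).symm
  · rw [if_neg hdig, pvFindK, pv_keys_split, List.find?_append]
    have hdnone : List.find? (fun k =>
        PySem.Str.slice word (some (i : Int)) (some ((i : Int) + PySem.Str.len k)) == k)
        ["0", "1", "2", "3", "4", "5", "6", "7", "8", "9"] = none := by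
      rw [List.find?_eq_none]
      intro d hd hp
      have hpre : d.toList <+: cs.drop i := (pv_slice_test word d i).1 hp
      rw [hdrop] at hpre
      fin_cases hd <;>
        (obtain ⟨h1, -⟩ := (List.cons_prefix_cons).1 hpre
         exact hdig (by rw [← h1]; decide))
    rw [hdnone, Option.or_none]

-- B's outer loop
theorem pv_scan_none (word : String) (m : Nat)
    (h : ∀ i < m, lnMatchAt word i = none) : lnScan word m = none := by
  induction m with
  | zero => rfl
  | succ m ih =>
    unfold lnScan
    rw [h m (by omega)]
    exact ih (fun i hi => h i (by omega))

theorem pv_scan_some (word : String) (m i : Nat) (k : String) (hi : i < m)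
    (hfind : lnMatchAt word i = some k)
    (habove : ∀ i', i < i' → i' < m → lnMatchAt word i' = none) :
    lnScan word m = some k := by
  induction m with
  | zero => omega
  | succ m ih =>
    unfold lnScan
    by_cases him : i = m
    · subst him
      rw [hfind]
    · rw [habove m (by omega) (by omega)]
      exact ih (by omega) (fun i' h1 h2 => habove i' h1 (by omega))

theorem pv_exists_max (f : String → Int) (L : List String) (h : L ≠ []) :
    ∃ b ∈ L, ∀ a ∈ L, f a ≤ f b := by
  induction L with
  | nil => exact absurd rfl h
  | cons a L ih =>
    rcases eq_or_ne L [] with hL | hL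
    · subst hL
      exact ⟨a, by simp, by simp⟩
    · obtain ⟨b, hb, hmax⟩ := ih hL
      rcases le_total (f a) (f b) with hab | hab
      · refine ⟨b, by simp [hb], ?_⟩
        intro x hx
        rcases List.mem_cons.1 hx with h' | h'
        · exact h' ▸ hab
        · exact hmax x h'
      · refine ⟨a, by simp, ?_⟩
        intro x hx
        rcases List.mem_cons.1 hx with h' | h'
        · exact h' ▸ le_refl _
        · exact le_trans (hmax x h') hab

theorem pv_main (word : String) : last_number word = last_number_alt word := by
  set cs := word.toList with hcs
  have hA0 : last_number word = (numbers.keys.foldl (pvF word) (-1, none)).2 := rfl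
  have hA : last_number word = (numbers.keys.foldl (pvG cs) (-1, none)).2 := by
    rw [hA0, pv_foldl_f_eq_g word numbers.keys (-1, none) pv_keys_ne_nil (by norm_num)]
  by_cases hex : ∃ k ∈ numbers.keys, 0 ≤ pvV cs k
  · rcases hex with ⟨k0, hk0, hV0⟩
    -- pick the key with the maximal rfind value
    obtain ⟨k, hk, hmaxle⟩ :
        ∃ k ∈ numbers.keys, ∀ k' ∈ numbers.keys, pvV cs k' ≤ pvV cs k := by
      exact pv_exists_max (pvV cs) numbers.keys (by rw [pv_keys_eq]; simp)
    have hVk : 0 ≤ pvV cs k := le_trans hV0 (hmaxle k0 hk0)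
    obtain ⟨i, hin, hVi, hpre, hmaxi⟩ :
        ∃ i ≤ cs.length, pvV cs k = (i : Int) ∧ k.toList <+: cs.drop i ∧
          ∀ i', k.toList <+: cs.drop i' → i' ≤ i := by
      rcases pv_rfind_spec cs k.toList (pv_keys_ne_nil k hk) with ⟨h1, _⟩ | h2
      · rw [pvV] at hVk; omega
      · exact h2
    -- strict maximality of k among the keys
    have hstrict : ∀ k' ∈ numbers.keys, k' ≠ k → pvV cs k' < pvV cs k := by
      intro k' hk' hne
      rcases lt_or_eq_of_le (hmaxle k' hk') with h | h
      · exact h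
      · exfalso
        obtain ⟨i', _, hVi', hpre', _⟩ :
            ∃ i' ≤ cs.length, pvV cs k' = (i' : Int) ∧ k'.toList <+: cs.drop i' ∧
              ∀ j, k'.toList <+: cs.drop j → j ≤ i' := by
          rcases pv_rfind_spec cs k'.toList (pv_keys_ne_nil k' hk') with ⟨h1, _⟩ | h2
          · exfalso
            have h3 : (0:Int) ≤ PySem.Chars.rfind cs k'.toList := by
              rw [show PySem.Chars.rfind cs k'.toList = pvV cs k' from rfl, h]; exact hVk
            omega
          · exact h2
        have hii : i' = i := by
          have h2 : (i' : Int) = (i : Int) := by rw [← hVi', h, hVi]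
          exact_mod_cast h2
        exact hne (pv_uniq (cs.drop i) k' k hk' hk (hii ▸ hpre') hpre)
    -- A returns k
    have hA2 : last_number word = some k := by
      rw [hA, pv_fold_pick cs numbers.keys (-1, none) k hk (by simpa using hVk) hstrict]
    -- B returns k
    have hilen : i < cs.length := by
      have hne : cs.drop i ≠ [] := by
        intro hnil
        rw [hnil, List.prefix_nil] at hpre
        exact pv_keys_ne_nil k hk hpre
      rcases Nat.lt_or_ge i cs.length with h | h
      · exact h
      · exact absurd (List.drop_eq_nil_of_le h) hne
    have hfind : lnMatchAt word i = some k := by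
      rw [pv_at_eq_findK word i hilen]
      exact pv_findK_eq_some word i k hk hpre
    have habove : ∀ i', i < i' → i' < cs.length → lnMatchAt word i' = none := by
      intro i' h1 h2
      rw [pv_at_eq_findK word i' h2, pvFindK, List.find?_eq_none]
      intro k' hk' hp'
      have hpre' : k'.toList <+: cs.drop i' := (pv_slice_test word k' i').1 hp'
      obtain ⟨j, _, hVj, _, hmaxj⟩ :
          ∃ j ≤ cs.length, pvV cs k' = (j : Int) ∧ k'.toList <+: cs.drop j ∧
            ∀ j', k'.toList <+: cs.drop j' → j' ≤ j := by
        rcases pv_rfind_spec cs k'.toList (pv_keys_ne_nil k' hk') with ⟨hh1, hh2⟩ | hh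
        · exact absurd hpre' (hh2 i')
        · exact hh
      have : i' ≤ j := hmaxj i' hpre'
      have : (j : Int) ≤ (i : Int) := by rw [← hVj, ← hVi]; exact hmaxle k' hk'
      omega
    rw [hA2, last_number_alt, pv_scan_some word cs.length i k hilen hfind habove]
  · have hex' : ∀ k ∈ numbers.keys, ¬ 0 ≤ pvV cs k := fun k hk h => hex ⟨k, hk, h⟩
    have hVall : ∀ k ∈ numbers.keys, pvV cs k = -1 := by
      intro k hk
      rcases pv_rfind_spec cs k.toList (pv_keys_ne_nil k hk) with ⟨h1, _⟩ | ⟨i, _, hVi, _, _⟩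
      · exact h1
      · exfalso
        exact hex' k hk (by rw [pvV, hVi]; positivity)
    have hA2 : last_number word = none := by
      rw [hA, pv_fold_stay cs numbers.keys (-1, none)
        (fun k hk => by rw [hVall k hk])]
    have hnoprefix : ∀ i, ∀ k ∈ numbers.keys, ¬ k.toList <+: cs.drop i := by
      intro i k hk hpre
      rcases pv_rfind_spec cs k.toList (pv_keys_ne_nil k hk) with ⟨_, h2⟩ | ⟨j, _, hVj, _, _⟩
      · exact h2 i hpre
      · have := hVall k hk; rw [pvV] at this; rw [this] at hVj; omega
    have hB : last_number_alt word = none := by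
      rw [last_number_alt]
      refine pv_scan_none word cs.length (fun i hi => ?_)
      rw [pv_at_eq_findK word i hi, pvFindK, List.find?_eq_none]
      intro k hk hp
      exact hnoprefix i k hk ((pv_slice_test word k i).1 hp)
    rw [hA2, hB]

-- ===== VERDICT (by name: the statement is the Claim_ definition above) =====
theorem last_number_spec : Claim_equal_last_number := by
  intro word _
  unfold Spec_last_number
  exact pv_main word
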